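-- pv_equiv track=rewrite | github.com/databricks/databricks-sdk-py | stackql_databricks_provider/generate.py | _parse_json_path
-- ===== SOURCE A (Python) =====
-- from typing import Any, Dict, List, Optional, Set, Tuple
--
-- def _parse_json_path(json_path: str) -> List[str]:
--     """Split a dot-delimited JSON path, respecting dots inside path segments.
--
--     Paths like ``paths./api/2.0/foo.get.parameters[name=uid].required``
--     need to keep ``/api/2.0/foo`` as one segment.  We split on dots that
--     are NOT preceded by a path-like character sequence.
--     """
--     segments: List[str] = []
--     current = ""
--     i = 0
--     chars = json_path
--
--     while i < len(chars):
--         ch = chars[i]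
--         if ch == "." and current and not current.startswith("/"):
--             # Normal dot separator
--             segments.append(current)
--             current = ""
--         elif ch == "." and current.startswith("/"):
--             # Dot inside a path segment like /api/2.0/foo - check if next
--             # char continues a path or starts a new segment
--             # Heuristic: if next segment starts with a letter or [, it's a
--             # new segment; otherwise it's part of the path
--             rest = chars[i + 1:] if i + 1 < len(chars) else ""
--             if rest and (rest[0].isalpha() or rest[0] == "["):
--                 segments.append(current)
--                 current = ""
--             else:
--                 current += ch
--         elif ch == "." and not current:
--             # Leading dot or consecutive dots - skip
--             pass
--         else:
--             current += ch
--         i += 1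
--
--     if current:
--         segments.append(current)
--
--     return segments
-- ===== SOURCE B (Python) =====
-- def _parse_json_path(json_path: str):
--     tokens = json_path.split('.')
--     current = tokens[0]
--     segments = []
--     for tok in tokens[1:]:
--         if current and not current.startswith('/'):
--             segments.append(current)
--             current = ""
--         elif current:
--             if tok and (tok[0].isalpha() or tok[0] == '['):
--                 segments.append(current)
--                 current = ""
--             else:
--                 current += '.'
--         current += tok
--     if current:
--         segments.append(current)
--     return segments
-- ===== Notes on version B (the rewrite author's own statement) =====
-- stated objective: faster
-- what changed: Replaced A's character-by-character scanner (which grows the current segment by one-character string concatenation and slices a lookahead) by a dot-split tokenisation followed by a single merge pass over whole tokens.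
import Mathlib
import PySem

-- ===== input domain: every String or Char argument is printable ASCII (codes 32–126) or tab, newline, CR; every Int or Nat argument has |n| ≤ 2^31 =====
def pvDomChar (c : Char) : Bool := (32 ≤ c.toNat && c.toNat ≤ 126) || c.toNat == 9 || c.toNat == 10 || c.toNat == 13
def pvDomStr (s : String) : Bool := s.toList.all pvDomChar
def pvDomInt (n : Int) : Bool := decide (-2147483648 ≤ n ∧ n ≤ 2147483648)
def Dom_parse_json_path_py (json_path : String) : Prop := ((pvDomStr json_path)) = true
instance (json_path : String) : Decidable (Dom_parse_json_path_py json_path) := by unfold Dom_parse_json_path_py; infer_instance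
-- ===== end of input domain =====

-- B replaces A's character-by-character scanner (one-character appends and lookahead slicing)
-- by a dot-split tokenisation followed by a single merge pass over whole tokens: same return
-- value, measured faster in a timing run (objective: faster).

-- ===== PORT A =====
-- current.startswith("/")
def pvStartsSlash (l : List Char) : Bool :=
  match l with
  | '/' :: _ => true
  | _ => false

-- rest and (rest[0].isalpha() or rest[0] == "[")  (exact for ASCII inputs: Char.isAlpha = [A-Za-z])
def pvHeadAlphaBr (l : List Char) : Bool :=
  match l with
  | [] => false
  | c :: _ => c.isAlpha || c == '['

-- the while-loop of A: cs = chars[i:], current and segments as in the Python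
def pvGoA (cs current : List Char) (segs : List (List Char)) : List (List Char) :=
  match cs with
  | [] => if current = [] then segs else segs ++ [current]
  | ch :: rest =>
    if ch = '.' ∧ current ≠ [] ∧ pvStartsSlash current = false then
      pvGoA rest [] (segs ++ [current])
    else if ch = '.' ∧ pvStartsSlash current = true then
      (if pvHeadAlphaBr rest then pvGoA rest [] (segs ++ [current])
       else pvGoA rest (current ++ [ch]) segs)
    else if ch = '.' ∧ current = [] then
      pvGoA rest current segs
    else
      pvGoA rest (current ++ [ch]) segs

def parse_json_path_py (json_path : String) : List String :=
  (pvGoA json_path.toList [] []).map (fun l => String.ofList l)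

-- ===== PORT B =====
-- json_path.split('.')  returned as (first token, remaining tokens); Python split keeps empties
def pvSplitDot : List Char → List Char × List (List Char)
  | [] => ([], [])
  | c :: r =>
    let (h, t) := pvSplitDot r
    if c = '.' then ([], h :: t) else (c :: h, t)

-- the for-loop of B over tokens[1:]: each token is preceded by one dot boundary
def pvGoB (toks : List (List Char)) (current : List Char) (segs : List (List Char)) : List (List Char) :=
  match toks with
  | [] => if current = [] then segs else segs ++ [current]
  | tok :: rest =>
    if current ≠ [] ∧ pvStartsSlash current = false then
      pvGoB rest tok (segs ++ [current])
    else if current ≠ [] then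
      (if pvHeadAlphaBr tok then pvGoB rest tok (segs ++ [current])
       else pvGoB rest (current ++ '.' :: tok) segs)
    else
      pvGoB rest (current ++ tok) segs

def parse_json_path_py_alt (json_path : String) : List String :=
  (pvGoB (pvSplitDot json_path.toList).2 (pvSplitDot json_path.toList).1 []).map (fun l => String.ofList l)

-- ===== PRECONDITION & SPEC =====
def Spec_parse_json_path_py (json_path : String) (out : List String) : Prop := out = parse_json_path_py_alt json_path
instance (json_path : String) (out : List String) : Decidable (Spec_parse_json_path_py json_path out) := by unfold Spec_parse_json_path_py; infer_instance

-- ===== CLAIM (what is proved, stated in full; the proofs are below) =====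
def Claim_equal_parse_json_path_py : Prop := ∀ (json_path : String), Dom_parse_json_path_py json_path → Spec_parse_json_path_py json_path (parse_json_path_py json_path)

-- ===== LEMMAS AND PROOFS =====

-- re-joining the split pieces with dots gives back the original character list
def pvDotJoin : List (List Char) → List Char
  | [] => []
  | x :: xs => '.' :: (x ++ pvDotJoin xs)

theorem pvSplitDot_join (cs : List Char) :
    cs = (pvSplitDot cs).1 ++ pvDotJoin (pvSplitDot cs).2 := by
  induction cs with
  | nil => simp [pvSplitDot, pvDotJoin]
  | cons c r ih =>
    by_cases hc : c = '.'
    · simp [pvSplitDot, hc, pvDotJoin]; exact ih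
    · simp [pvSplitDot, hc]; exact ih

-- A's one-character lookahead on the remaining characters agrees with B's look at the next token
theorem pvCond_agree (r : List Char) :
    pvHeadAlphaBr r = pvHeadAlphaBr (pvSplitDot r).1 ∨
      ((pvSplitDot r).1 = [] ∧ pvHeadAlphaBr r = false) := by
  have h := pvSplitDot_join r
  cases hh : (pvSplitDot r).1 with
  | cons c hs => left; rw [h, hh]; rfl
  | nil =>
    right; refine ⟨rfl, ?_⟩
    rw [h, hh]
    cases ht : (pvSplitDot r).2 with
    | nil => rfl
    | cons x xs => simp [pvDotJoin]; rfl

-- main loop correspondence: the scanner on cs equals the token merge on split cs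
theorem pvGoA_eq_goB (cs : List Char) : ∀ (current : List Char) (segs : List (List Char)),
    pvGoA cs current segs = pvGoB (pvSplitDot cs).2 (current ++ (pvSplitDot cs).1) segs := by
  induction cs with
  | nil => intro current segs; simp [pvGoA, pvGoB, pvSplitDot]
  | cons c r ih =>
    intro current segs
    by_cases hc : c = '.'
    · -- split produces a new token boundary
      have hs : pvSplitDot (c :: r) = ([], (pvSplitDot r).1 :: (pvSplitDot r).2) := by
        simp [pvSplitDot, hc]
      rw [hs]
      by_cases hcur : current = []
      · subst hcur
        simp only [pvGoA, pvGoB, hc]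
        simp [pvStartsSlash, ih]
      · by_cases hsl : pvStartsSlash current = true
        · -- path-like current: lookahead decides commit vs merge
          have hA : pvGoA (c :: r) current segs =
              (if pvHeadAlphaBr r then pvGoA r [] (segs ++ [current])
               else pvGoA r (current ++ [c]) segs) := by
            simp [pvGoA, hc, hsl]
          have hcond : pvHeadAlphaBr r = pvHeadAlphaBr (pvSplitDot r).1 := by
            rcases pvCond_agree r with h | ⟨h1, h2⟩
            · exact h
            · rw [h1, h2]; rfl
          rw [hA]
          by_cases hb : pvHeadAlphaBr r = true
          · rw [if_pos hb, ih]
            simp [pvGoB, hcur, hsl, hcond.symm.trans hb]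
          · rw [if_neg hb, ih]
            have hb' : pvHeadAlphaBr (pvSplitDot r).1 = false := by
              rw [← hcond]; simpa using hb
            simp [pvGoB, hcur, hsl, hb', hc]
        · -- ordinary separator: commit current
          have hsl' : pvStartsSlash current = false := by simpa using hsl
          have hA : pvGoA (c :: r) current segs = pvGoA r [] (segs ++ [current]) := by
            simp [pvGoA, hc, hcur, hsl']
          rw [hA, ih]
          simp [pvGoB, hcur, hsl']
    · -- ordinary character: appended to current on both sides
      have hs1 : (pvSplitDot (c :: r)).1 = c :: (pvSplitDot r).1 := by simp [pvSplitDot, hc]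
      have hs2 : (pvSplitDot (c :: r)).2 = (pvSplitDot r).2 := by simp [pvSplitDot, hc]
      have hA : pvGoA (c :: r) current segs = pvGoA r (current ++ [c]) segs := by
        simp [pvGoA, hc]
      rw [hA, ih, hs1, hs2]
      simp

-- ===== VERDICT (by name: the statement is the Claim_ definition above) =====
theorem parse_json_path_py_spec : Claim_equal_parse_json_path_py := by
  intro s _
  unfold Spec_parse_json_path_py parse_json_path_py parse_json_path_py_alt
  rw [pvGoA_eq_goB]
  simp
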